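-- pv_equiv track=rewrite | github.com/poojithayadavalli/codekata | primesumend3.py | sumprime
-- ===== SOURCE A (Python) =====
-- def isprime(n):
--     flag=True
--     if n==2:
--         flag=True
--     else:
--         for i in range(2,n):
--             if n%i==0 :
--                 flag=False
--     return flag
--
-- def sumprime(x):
--     l=[]
--     for i in range(2,int(x)+1):
--         if isprime(i):
--             s=str(i)
--             if s[len(s)-1]=='3':
--                 l.append(s)
--     return l
-- ===== SOURCE B (Python) =====
-- def sumprime(x):
--     out = []
--     for n in range(3, int(x) + 1, 10):
--         d = 2
--         prime = True
--         while d * d <= n: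
--             if n % d == 0:
--                 prime = False
--                 break
--             d += 1
--         if prime:
--             out.append(str(n))
--     return out
-- ===== Notes on version B (the rewrite author's own statement) =====
-- stated objective: faster
-- what changed: B iterates only over candidates ending in digit 3 (range(3,x+1,10)) and tests each by trial division up to sqrt(n) with early exit, instead of A's full-range trial division up to n-1 without early exit plus a string last-character test.
import Mathlib
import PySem

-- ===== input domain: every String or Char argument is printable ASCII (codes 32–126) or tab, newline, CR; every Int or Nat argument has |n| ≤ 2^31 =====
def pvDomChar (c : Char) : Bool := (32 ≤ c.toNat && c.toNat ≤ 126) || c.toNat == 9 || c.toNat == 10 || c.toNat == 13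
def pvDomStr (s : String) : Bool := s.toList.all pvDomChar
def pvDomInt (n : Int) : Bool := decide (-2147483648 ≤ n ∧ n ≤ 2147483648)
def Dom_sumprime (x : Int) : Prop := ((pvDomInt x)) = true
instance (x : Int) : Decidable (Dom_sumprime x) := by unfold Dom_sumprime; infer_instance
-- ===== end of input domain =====

-- B replaces A's full trial division over every 2..x plus a last-character test by a loop over
-- only the candidates ending in digit 3 (step-10 range) with trial division up to sqrt(n).

-- ===== PORT A =====
def isprime (n : Int) : Bool :=
  -- flag=True; if n==2: flag=True else: for i in range(2,n): if n%i==0: flag=False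
  if n == 2 then true
  else (PySem.List.pyRange 2 n 1).foldl (fun flag i => if n % i == 0 then false else flag) true

def sumprime (x : Int) : List String :=
  (PySem.List.pyRange 2 (x + 1) 1).foldl
    (fun l i =>
      if isprime i then
        let s := PySem.Int.toStr i
        if PySem.Str.pyGet? s (PySem.Str.len s - 1) == some '3' then l ++ [s] else l
      else l) []

-- ===== PORT B =====
-- the 'while d*d <= n' trial-division loop of Source B (d counts up from 2)
def trialDiv (n d : Int) : Bool :=
  if h : d * d ≤ n then
    if n % d == 0 then false else trialDiv n (d + 1)
  else true
termination_by (n + 1 - d).toNat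
decreasing_by
  have h2 : d ≤ d * d := by nlinarith [Int.le_self_sq d]
  have h3 : d ≤ n := le_trans h2 h
  omega

def sumprime_alt (x : Int) : List String :=
  (PySem.List.pyRange 3 (x + 1) 10).foldl
    (fun out n => if trialDiv n 2 then out ++ [PySem.Int.toStr n] else out) []

-- ===== PRECONDITION & SPEC =====
def Spec_sumprime (x : Int) (out : List String) : Prop := out = sumprime_alt x
instance (x : Int) (out : List String) : Decidable (Spec_sumprime x out) := by unfold Spec_sumprime; infer_instance

-- ===== CLAIM (what is proved, stated in full; the proofs are below) =====
def Claim_equal_sumprime : Prop := ∀ (x : Int), Dom_sumprime x → Spec_sumprime x (sumprime x)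

-- ===== LEMMAS AND PROOFS =====

-- A's primality flag as a 'no divisor in [2,n)' test
lemma isprime_eq (n : Int) :
    isprime n = !(PySem.List.pyRange 2 n 1).any (fun i => n % i == 0) := by
  unfold isprime
  split
  · rename_i h
    have h2 : n = 2 := by simpa using h
    subst h2
    rw [PySem.List.pyRange_one_eq_nil (by omega)]
    simp
  · rw [PySem.List.foldl_if_false_eq]
    simp

-- B's while loop tests every divisor d ≤ e, e*e ≤ n
theorem trialDiv_iff (n d : Int) (hd : 2 ≤ d) :
    trialDiv n d = true ↔ ∀ e : Int, d ≤ e → e * e ≤ n → ¬ n % e = 0 := by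
  rw [trialDiv]
  split
  · rename_i hdd
    split
    · rename_i hmod
      simp only [Bool.false_eq_true, false_iff]
      push Not
      exact ⟨d, le_refl d, hdd, by simpa using hmod⟩
    · rename_i hmod
      rw [trialDiv_iff n (d + 1) (by omega)]
      constructor
      · intro h e hde hee
        rcases eq_or_lt_of_le hde with rfl | hlt
        · simpa using hmod
        · exact h e (by omega) hee
      · intro h e hde hee
        exact h e (by omega) hee
  · rename_i hdd
    simp only [true_iff]
    intro e hde hee
    have hdd' : d * d ≤ e * e :=
      mul_le_mul hde hde (by omega) (by omega)
    omega
termination_by (n + 1 - d).toNat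
decreasing_by
  have h2 : d ≤ d * d := by nlinarith [Int.le_self_sq d]
  have h3 : d ≤ n := le_trans h2 ‹d * d ≤ n›
  omega

-- divisibility bridge between Int emod and Nat dvd
lemma emod_zero_iff_toNat_dvd (n i : Int) (hn : 0 ≤ n) (hi : 0 < i) :
    n % i = 0 ↔ i.toNat ∣ n.toNat := by
  rw [PySem.Int.emod_eq_zero_iff_dvd]
  constructor
  · intro h
    have h' : (i.toNat : Int) ∣ (n.toNat : Int) := by
      rwa [Int.toNat_of_nonneg (by omega), Int.toNat_of_nonneg hn]
    exact Int.natCast_dvd_natCast.mp h' 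
  · intro h
    have h' := Int.natCast_dvd_natCast.mpr h
    rwa [Int.toNat_of_nonneg (by omega), Int.toNat_of_nonneg hn] at h'

-- A's test is primality of n
lemma isprime_iff (n : Int) (hn : 2 ≤ n) :
    isprime n = true ↔ Nat.Prime n.toNat := by
  rw [isprime_eq]
  simp only [Bool.not_eq_eq_eq_not, Bool.not_true, List.any_eq_false, beq_iff_eq]
  constructor
  · intro h
    rw [Nat.prime_def_lt']
    refine ⟨by omega, ?_⟩
    intro m h2m hmn hdvd
    have hm : ((m : Int)) ∈ PySem.List.pyRange 2 n 1 := by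
      rw [PySem.List.mem_pyRange_one]; omega
    refine h _ hm ?_
    rw [emod_zero_iff_toNat_dvd n m (by omega) (by omega)]
    simpa using hdvd
  · intro hp i hi
    rw [PySem.List.mem_pyRange_one] at hi
    intro h0
    rw [emod_zero_iff_toNat_dvd n i (by omega) (by omega)] at h0
    exact (Nat.prime_def_lt'.mp hp).2 i.toNat (by omega) (by omega) h0

-- B's test is primality of n (trial division up to the square root suffices)
lemma trialDiv_prime_iff (n : Int) (hn : 2 ≤ n) :
    trialDiv n 2 = true ↔ Nat.Prime n.toNat := by
  rw [trialDiv_iff n 2 (le_refl 2)]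
  constructor
  · intro h
    rw [Nat.prime_def_le_sqrt]
    refine ⟨by omega, ?_⟩
    intro m h2m hms hdvd
    have hmm : (m : Int) * (m : Int) ≤ n := by
      have h1 : m * m ≤ n.toNat := Nat.le_sqrt.mp hms
      have h2 : ((m * m : Nat) : Int) ≤ ((n.toNat : Nat) : Int) := by exact_mod_cast h1
      have h3 : ((n.toNat : Nat) : Int) = n := Int.toNat_of_nonneg (by omega)
      push_cast at h2
      linarith
    refine h (m : Int) (by omega) hmm ?_
    rw [emod_zero_iff_toNat_dvd n m (by omega) (by omega)]
    simpa using hdvd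
  · intro hp e h2e hee
    intro h0
    rw [emod_zero_iff_toNat_dvd n e (by omega) (by omega)] at h0
    refine (Nat.prime_def_le_sqrt.mp hp).2 e.toNat (by omega) ?_ h0
    rw [Nat.le_sqrt]
    have : ((e.toNat * e.toNat : Nat) : Int) ≤ (n.toNat : Int) := by
      push_cast
      rw [Int.toNat_of_nonneg (by omega), Int.toNat_of_nonneg (by omega)]
      omega
    exact_mod_cast this

-- on [2, ∞) A's and B's primality tests agree
lemma isprime_eq_trialDiv (n : Int) (hn : 2 ≤ n) : isprime n = trialDiv n 2 := by
  have h1 := isprime_iff n hn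
  have h2 := trialDiv_prime_iff n hn
  cases ha : isprime n <;> cases hb : trialDiv n 2 <;> simp_all

-- the last character of str(i) is '3' iff i % 10 == 3 (for i ≥ 2)
lemma digit3_eq (i : Int) (hi : 2 ≤ i) :
    (PySem.Str.pyGet? (PySem.Int.toStr i) (PySem.Str.len (PySem.Int.toStr i) - 1) == some '3')
      = (i % 10 == 3) := by
  have hneg : ¬ i < 0 := by omega
  have hchars : (PySem.Int.toStr i).toList = Nat.toDigits 10 i.toNat := by
    simp [PySem.Int.toStr, String.toList_ofList, PySem.Int.toChars, hneg]
  set cs := Nat.toDigits 10 i.toNat with hcs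
  have hlast : cs.getLast? = some ((i.toNat % 10).digitChar) := by
    rw [hcs, Nat.toDigits_eq_if (by norm_num)]
    split
    · rename_i hlt
      rw [Nat.mod_eq_of_lt hlt]
      rfl
    · simp
  have hlen : 1 ≤ cs.length := by
    rcases h : cs with _ | ⟨c, t⟩
    · rw [h] at hlast; simp at hlast
    · simp
  have hget : PySem.Str.pyGet? (PySem.Int.toStr i) (PySem.Str.len (PySem.Int.toStr i) - 1)
      = cs.getLast? := by
    rw [PySem.Str.pyGet?, PySem.Str.len, hchars]
    rw [show (cs.length : Int) - 1 = ((cs.length - 1 : Nat) : Int) by omega]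
    rw [PySem.Chars.pyGet?, PySem.List.pyGet?_natCast, List.getLast?_eq_getElem?]
  rw [hget, hlast]
  have hmod : i % 10 = ((i.toNat % 10 : Nat) : Int) := by omega
  rw [hmod]
  have h10 : i.toNat % 10 < 10 := Nat.mod_lt _ (by norm_num)
  set r := i.toNat % 10 with hr
  interval_cases r <;> decide

-- B's step-10 range is exactly A's range filtered to last-digit-3 numbers
lemma range10_eq (x : Int) :
    PySem.List.pyRange 3 (x + 1) 10
      = (PySem.List.pyRange 2 (x + 1) 1).filter (fun i => i % 10 == 3) := by
  have hpw1 : (PySem.List.pyRange 3 (x + 1) 10).Pairwise (· < ·) := by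
    rw [PySem.List.pyRange_of_pos 3 (x + 1) (by norm_num)]
    rw [List.pairwise_map]
    exact List.pairwise_lt_range.imp (by intro a b hab; omega)
  have hpw2 : ((PySem.List.pyRange 2 (x + 1) 1).filter (fun i => i % 10 == 3)).Pairwise (· < ·) :=
    (PySem.List.pairwise_lt_pyRange_one 2 (x + 1)).sublist List.filter_sublist
  have hmem : ∀ a : Int, a ∈ PySem.List.pyRange 3 (x + 1) 10
      ↔ a ∈ (PySem.List.pyRange 2 (x + 1) 1).filter (fun i => i % 10 == 3) := by
    intro a
    rw [PySem.List.mem_pyRange_iff_of_pos (by norm_num), List.mem_filter,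
      PySem.List.mem_pyRange_one]
    simp only [beq_iff_eq]
    omega
  have hperm : (PySem.List.pyRange 3 (x + 1) 10).Perm
      ((PySem.List.pyRange 2 (x + 1) 1).filter (fun i => i % 10 == 3)) := by
    rw [List.perm_ext_iff_of_nodup (hpw1.imp ne_of_lt) (hpw2.imp ne_of_lt)]
    exact hmem
  exact List.Perm.eq_of_pairwise (by intro a b _ _ h1 h2; omega) hpw1 hpw2 hperm

-- ===== VERDICT (by name: the statement is the Claim_ definition above) =====
theorem sumprime_spec : Claim_equal_sumprime := by
  unfold Claim_equal_sumprime Spec_sumprime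
  intro x _
  unfold sumprime sumprime_alt
  have hA : (fun (l : List String) (i : Int) =>
        if isprime i then
          let s := PySem.Int.toStr i
          if PySem.Str.pyGet? s (PySem.Str.len s - 1) == some '3' then l ++ [s] else l
        else l)
      = fun l i =>
        if (isprime i &&
            (PySem.Str.pyGet? (PySem.Int.toStr i)
              (PySem.Str.len (PySem.Int.toStr i) - 1) == some '3')) then
          l ++ [PySem.Int.toStr i]
        else l := by
    funext l i
    by_cases h1 : isprime i <;> simp [h1]
  rw [hA, PySem.List.foldl_append_if, PySem.List.foldl_append_if]
  simp only [List.nil_append]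
  rw [range10_eq, List.filter_filter]
  congr 1
  apply List.filter_congr
  intro i hi
  rw [PySem.List.mem_pyRange_one] at hi
  rw [digit3_eq i (by omega), isprime_eq_trialDiv i (by omega)]
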